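-- pv_equiv track=rewrite | github.com/BWSI-RACECAR/code-clash-09-Jiw00 | licenseplate.py | licensePlate
-- ===== SOURCE A (Python) =====
-- def licensePlate(str):
--     str1 = str[:3]
--     str2 = str[3:]
--     count1 = 0
--     count2 = 0
--     count = 0
--     for i in str1:
--         if i == ".":
--             count2 += 1
--     for j in str2:
--         if j == ".":
--             count1 += 1
--
--     if count1 >= 1:
--         count += 10-(4-count1)
--     if count1 >= 2:
--         count *= 9-(4-count1)
--     if count1 >= 3:
--         count *= 8-(4-count1)
--     if count1 >= 4:
--         count *= 7-(4-count1)
--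
--     if count == 0 and count2 >= 1:
--         count += 26-(3-count2)
--     elif count2 >= 1:
--         count *= 26-(3-count2)
--     if count2 >= 2:
--         count *= 25- (3-count2)
--     if count2 >= 3:
--         count *= 24- (3-count2)
--
--     return count
-- ===== SOURCE B (Python) =====
-- def _fact(n):
--     return 1 if n == 0 else n * _fact(n - 1)
--
--
-- def licensePlate(str):
--     digit_dots = 0
--     letter_dots = 0
--     for idx, ch in enumerate(str):
--         if ch == ".":
--             if idx < 3:
--                 letter_dots += 1
--             else:
--                 digit_dots += 1
--     if digit_dots == 0 and letter_dots == 0: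
--         return 0
--     a = min(digit_dots, 4)
--     return (_fact(digit_dots + 6) // _fact(digit_dots + 6 - a)) * (
--         _fact(letter_dots + 23) // _fact(23)
--     )
-- ===== Notes on version B (the rewrite author's own statement) =====
-- stated objective: alternative
-- what changed: Replaces A's two slice loops plus eight-step conditional add/multiply cascade by a single enumerate pass that classifies each dot by its index, followed by one factorial-quotient formula fact(k+6)//fact(k+6-min(k,4)) * fact(m+23)//fact(23) with the single both-zero special case.
import Mathlib
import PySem

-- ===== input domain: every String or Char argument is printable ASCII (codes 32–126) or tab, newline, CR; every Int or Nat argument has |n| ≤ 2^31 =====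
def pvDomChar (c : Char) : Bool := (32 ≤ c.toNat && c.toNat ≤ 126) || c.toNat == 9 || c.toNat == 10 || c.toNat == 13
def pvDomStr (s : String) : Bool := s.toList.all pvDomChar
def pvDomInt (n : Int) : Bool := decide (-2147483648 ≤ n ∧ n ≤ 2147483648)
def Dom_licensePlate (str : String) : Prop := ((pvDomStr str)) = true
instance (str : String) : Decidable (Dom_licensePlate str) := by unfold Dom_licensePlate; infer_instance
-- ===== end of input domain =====

-- B replaces A's two slice loops and conditional add/multiply cascade by one
-- index-classifying enumerate pass and a factorial-quotient formula (same cost; objective: alternative).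


-- ===== PORT A =====
def licensePlate (str : String) : Int :=
  let str1 := PySem.Str.slice str none (some 3)
  let str2 := PySem.Str.slice str (some 3) none
  let count2 : Int := str1.toList.foldl (fun acc i => if i == '.' then acc + 1 else acc) 0
  let count1 : Int := str2.toList.foldl (fun acc j => if j == '.' then acc + 1 else acc) 0
  let count : Int := 0
  let count := if count1 ≥ 1 then count + (10 - (4 - count1)) else count
  let count := if count1 ≥ 2 then count * (9 - (4 - count1)) else count
  let count := if count1 ≥ 3 then count * (8 - (4 - count1)) else count
  let count := if count1 ≥ 4 then count * (7 - (4 - count1)) else count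
  let count := if count = 0 ∧ count2 ≥ 1 then count + (26 - (3 - count2))
               else if count2 ≥ 1 then count * (26 - (3 - count2)) else count
  let count := if count2 ≥ 2 then count * (25 - (3 - count2)) else count
  let count := if count2 ≥ 3 then count * (24 - (3 - count2)) else count
  count

-- ===== PORT B =====
-- Source B's recursive _fact; its argument is always a nonnegative int there, so Nat is exact
def pvFact : Nat → Nat
  | 0 => 1
  | n + 1 => (n + 1) * pvFact n

def licensePlate_alt (str : String) : Int :=
  let p :=
    (PySem.List.enumerate str.toList).foldl
      (fun (p : Nat × Nat) (ic : Int × Char) =>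
        if ic.2 == '.' then (if ic.1 < 3 then (p.1, p.2 + 1) else (p.1 + 1, p.2)) else p)
      (0, 0)
  let digitDots := p.1
  let letterDots := p.2
  if digitDots = 0 ∧ letterDots = 0 then 0
  else
    let a := min digitDots 4
    -- both '//' divisions of Source B are on nonnegative ints, where Nat division is exact
    ((pvFact (digitDots + 6) / pvFact (digitDots + 6 - a)) *
      (pvFact (letterDots + 23) / pvFact 23) : Nat)

-- ===== PRECONDITION & SPEC =====
def Spec_licensePlate (str : String) (out : Int) : Prop := out = licensePlate_alt str
instance (str : String) (out : Int) : Decidable (Spec_licensePlate str out) := by unfold Spec_licensePlate; infer_instance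

-- ===== CLAIM (what is proved, stated in full; the proofs are below) =====
def Claim_equal_licensePlate : Prop := ∀ (str : String), Dom_licensePlate str → Spec_licensePlate str (licensePlate str)

-- ===== LEMMAS AND PROOFS =====

-- B's fold step
def pvStep (p : Nat × Nat) (ic : Int × Char) : Nat × Nat :=
  if ic.2 == '.' then (if ic.1 < 3 then (p.1, p.2 + 1) else (p.1 + 1, p.2)) else p

lemma foldl_enum_low (l : List Char) (s : Int) (p : Nat × Nat)
    (h : s + l.length ≤ 3) (h0 : 0 ≤ s) :
    (PySem.List.enumerate l s).foldl pvStep p = (p.1, p.2 + l.count '.') := by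
  induction l generalizing s p with
  | nil => simp [PySem.List.enumerate_nil]
  | cons c t ih =>
    have hc : s < 3 := by simp at h; omega
    by_cases hcd : c = '.'
    · simp only [PySem.List.enumerate_cons, List.foldl_cons,
        ih (s + 1) _ (by simp at h ⊢; omega) (by omega), pvStep, hcd]
      simp [hc]
      omega
    · simp only [PySem.List.enumerate_cons, List.foldl_cons,
        ih (s + 1) _ (by simp at h ⊢; omega) (by omega), pvStep]
      simp [hcd]

lemma foldl_enum_high (l : List Char) (s : Int) (p : Nat × Nat) (h : 3 ≤ s) :
    (PySem.List.enumerate l s).foldl pvStep p = (p.1 + l.count '.', p.2) := by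
  induction l generalizing s p with
  | nil => simp [PySem.List.enumerate_nil]
  | cons c t ih =>
    by_cases hcd : c = '.'
    · simp only [PySem.List.enumerate_cons, List.foldl_cons,
        ih (s + 1) _ (by omega), pvStep, hcd]
      have : ¬ s < 3 := by omega
      simp [this]
      omega
    · simp only [PySem.List.enumerate_cons, List.foldl_cons,
        ih (s + 1) _ (by omega), pvStep]
      simp [hcd]

lemma pvFact_pos (n : Nat) : 0 < pvFact n := by
  induction n with
  | zero => simp [pvFact]
  | succ k ih => simp [pvFact]; positivity

lemma pvFact_add_four (n : Nat) :
    pvFact (n + 4) = (n + 4) * ((n + 3) * ((n + 2) * ((n + 1) * pvFact n))) := by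
  simp [pvFact]

-- the arithmetic heart: A's conditional cascade equals B's factorial quotient,
-- for dot counts K (arbitrary) and M ≤ 3
-- the arithmetic heart: A's conditional cascade (with the two dot counts K, M
-- substituted) equals B's factorial-quotient expression, for M ≤ 3
set_option maxHeartbeats 1600000 in
lemma cascade_eq (K M : Nat) (hM : M ≤ 3) :
    (let count2 : Int := 0 + (M : Int)
     let count1 : Int := 0 + (K : Int)
     let count : Int := 0
     let count := if count1 ≥ 1 then count + (10 - (4 - count1)) else count
     let count := if count1 ≥ 2 then count * (9 - (4 - count1)) else count
     let count := if count1 ≥ 3 then count * (8 - (4 - count1)) else count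
     let count := if count1 ≥ 4 then count * (7 - (4 - count1)) else count
     let count := if count = 0 ∧ count2 ≥ 1 then count + (26 - (3 - count2))
                  else if count2 ≥ 1 then count * (26 - (3 - count2)) else count
     let count := if count2 ≥ 2 then count * (25 - (3 - count2)) else count
     let count := if count2 ≥ 3 then count * (24 - (3 - count2)) else count
     count) =
    (let p : Nat × Nat := (K, M)
     let digitDots := p.1
     let letterDots := p.2
     if digitDots = 0 ∧ letterDots = 0 then (0 : Int)
     else
       let a := min digitDots 4
       ((pvFact (digitDots + 6) / pvFact (digitDots + 6 - a)) *
         (pvFact (letterDots + 23) / pvFact 23) : Nat)) := by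
  simp only [zero_add]
  by_cases h4 : 4 ≤ K
  · -- digit quotient is the four-term falling product
    have hmin : K + 6 - min K 4 = K + 2 := by omega
    have hexp : pvFact (K + 6) = ((K + 6) * ((K + 5) * ((K + 4) * (K + 3)))) * pvFact (K + 2) := by
      rw [show K + 6 = (K + 2) + 4 from by omega, pvFact_add_four]; ring
    have hq : pvFact (K + 6) / pvFact (K + 2) = (K + 6) * ((K + 5) * ((K + 4) * (K + 3))) := by
      rw [hexp, Nat.mul_div_cancel _ (pvFact_pos _)]
    have h1 : (K : Int) ≥ 1 := by omega
    have h2 : (K : Int) ≥ 2 := by omega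
    have h3 : (K : Int) ≥ 3 := by omega
    have h4' : (K : Int) ≥ 4 := by omega
    have hK0 : ¬ (K = 0 ∧ M = 0) := by omega
    have hprod : (0 : Int) <
        (10 - (4 - (K : Int))) * (9 - (4 - (K : Int))) * (8 - (4 - (K : Int))) *
          (7 - (4 - (K : Int))) :=
      mul_pos (mul_pos (mul_pos (by omega) (by omega)) (by omega)) (by omega)
    have hne : ¬ ((10 - (4 - (K : Int))) * (9 - (4 - (K : Int))) * (8 - (4 - (K : Int))) *
          (7 - (4 - (K : Int))) = 0 ∧ 1 ≤ (M : Int)) := fun hA => hprod.ne' hA.1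
    simp only [ge_iff_le, h1, h2, h3, h4', if_true, hK0, if_false, hmin, hq]
    rw [if_neg hne]
    interval_cases M
    · norm_num [Nat.div_self (pvFact_pos 23)]; ring
    · norm_num [show pvFact 24 / pvFact 23 = 24 from by decide]; ring
    · norm_num [show pvFact 25 / pvFact 23 = 600 from by decide]; ring
    · norm_num [show pvFact 26 / pvFact 23 = 15600 from by decide]; ring
  · interval_cases K <;> interval_cases M <;> decide

-- ===== VERDICT (by name: the statement is the Claim_ definition above) =====
set_option maxHeartbeats 1600000 in
theorem licensePlate_spec : Claim_equal_licensePlate := by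
  intro str _
  unfold Spec_licensePlate licensePlate licensePlate_alt
  have hs1 : (PySem.Str.slice str none (some 3)).toList = str.toList.take 3 := by simp [pysem]
  have hs2 : (PySem.Str.slice str (some 3) none).toList = str.toList.drop 3 := by simp [pysem]
  have henum : (PySem.List.enumerate str.toList 0).foldl
      (fun (p : Nat × Nat) (ic : Int × Char) =>
        if ic.2 == '.' then (if ic.1 < 3 then (p.1, p.2 + 1) else (p.1 + 1, p.2)) else p)
      (0, 0) =
      ((str.toList.drop 3).count '.', (str.toList.take 3).count '.') := by
    show (PySem.List.enumerate str.toList 0).foldl pvStep (0, 0) = _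
    conv_lhs => rw [show str.toList = str.toList.take 3 ++ str.toList.drop 3 from by simp]
    rw [PySem.List.enumerate_append, List.foldl_append,
        foldl_enum_low (str.toList.take 3) 0 (0, 0)
          (by have h := List.length_take_le 3 str.toList; omega) (by norm_num)]
    by_cases hlen : str.toList.length ≤ 3
    · rw [List.drop_eq_nil_of_le hlen]
      simp [PySem.List.enumerate_nil]
    · rw [foldl_enum_high (str.toList.drop 3) _ _
        (by rw [List.length_take]; push_cast; omega)]
      simp
  have hM : (str.toList.take 3).count '.' ≤ 3 :=
    le_trans (List.count_le_length) (by simp)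
  simp only [hs1, hs2, PySem.List.foldl_beq_add_one, henum]
  exact cascade_eq ((str.toList.drop 3).count '.') ((str.toList.take 3).count '.') hM
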